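-- pv_equiv track=rewrite | github.com/chrislemke/alive | mount/metacognition.py | _sources_per_topic
-- ===== SOURCE A (Python) =====
-- from typing import Dict, List, Any
--
-- def _sources_per_topic(topics: Dict) -> Dict[str, int]:
--     """Calculate sources per topic"""
--     distribution = {
--         '1 source': 0,
--         '2 sources': 0,
--         '3+ sources': 0,
--     }
--
--     for topic in topics.values():
--         source_count = len(topic.get('sources', []))
--         if source_count == 1:
--             distribution['1 source'] += 1
--         elif source_count == 2:
--             distribution['2 sources'] += 1
--         else:
--             distribution['3+ sources'] += 1
--
--     return distribution
-- ===== SOURCE B (Python) =====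
-- def _sources_per_topic(topics):
--     """Calculate sources per topic"""
--     counts = [len(t.get('sources', [])) for t in topics.values()]
--     one = sum(1 for c in counts if c == 1)
--     two = sum(1 for c in counts if c == 2)
--     return {
--         '1 source': one,
--         '2 sources': two,
--         '3+ sources': len(counts) - one - two,
--     }
-- ===== Notes on version B (the rewrite author's own statement) =====
-- stated objective: alternative
-- what changed: Replaces the single accumulating loop over a mutable three-key dict with independent filtered counting passes: the 1- and 2-source buckets are counted directly and the 3+ bucket is derived as the total minus the other two.
import Mathlib
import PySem

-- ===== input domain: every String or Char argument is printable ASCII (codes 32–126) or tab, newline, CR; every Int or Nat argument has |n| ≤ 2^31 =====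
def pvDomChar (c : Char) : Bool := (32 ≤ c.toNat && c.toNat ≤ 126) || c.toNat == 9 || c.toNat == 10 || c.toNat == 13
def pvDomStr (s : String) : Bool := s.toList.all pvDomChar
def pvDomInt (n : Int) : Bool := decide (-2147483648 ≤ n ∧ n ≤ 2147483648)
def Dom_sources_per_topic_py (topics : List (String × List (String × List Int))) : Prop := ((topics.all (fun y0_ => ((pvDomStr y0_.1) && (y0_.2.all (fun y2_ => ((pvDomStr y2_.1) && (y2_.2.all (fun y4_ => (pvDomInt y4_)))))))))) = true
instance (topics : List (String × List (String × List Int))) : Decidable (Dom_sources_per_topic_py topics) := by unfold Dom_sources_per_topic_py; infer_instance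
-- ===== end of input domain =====

-- B replaces A's single accumulating loop over a mutable 3-key dict by independent
-- counting passes (count the 1- and 2-source topics, derive the 3+ bucket as total minus both).

-- ===== PORT A =====
-- loop body of A's 'for topic in topics.values()' (named so the fold is readable)
def sources_per_topic_py_step (d : PySem.Dict String Int)
    (p : String × List (String × List Int)) : PySem.Dict String Int :=
  let source_count : Int := ((PySem.Dict.mk p.2).getD "sources" []).length
  if source_count = 1 then d.insert "1 source" (d.getD "1 source" 0 + 1)
  else if source_count = 2 then d.insert "2 sources" (d.getD "2 sources" 0 + 1)
  else d.insert "3+ sources" (d.getD "3+ sources" 0 + 1)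

def sources_per_topic_py (topics : List (String × List (String × List Int))) : List (String × Int) :=
  let distribution : PySem.Dict String Int :=
    PySem.Dict.mk [("1 source", 0), ("2 sources", 0), ("3+ sources", 0)]
  (topics.foldl sources_per_topic_py_step distribution).items

-- ===== PORT B =====
def sources_per_topic_py_alt (topics : List (String × List (String × List Int))) : List (String × Int) :=
  let counts : List Int := topics.map (fun p => ((PySem.Dict.mk p.2).getD "sources" []).length)
  let one : Int := counts.countP (· == 1)
  let two : Int := counts.countP (· == 2)
  [("1 source", one), ("2 sources", two), ("3+ sources", (counts.length : Int) - one - two)]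

-- ===== PRECONDITION & SPEC =====
def Spec_sources_per_topic_py (topics : List (String × List (String × List Int))) (out : List (String × Int)) : Prop := out = sources_per_topic_py_alt topics
instance (topics : List (String × List (String × List Int))) (out : List (String × Int)) : Decidable (Spec_sources_per_topic_py topics out) := by unfold Spec_sources_per_topic_py; infer_instance

-- ===== CLAIM (what is proved, stated in full; the proofs are below) =====
def Claim_equal_sources_per_topic_py : Prop := ∀ (topics : List (String × List (String × List Int))), Dom_sources_per_topic_py topics → Spec_sources_per_topic_py topics (sources_per_topic_py topics)

-- ===== LEMMAS AND PROOFS =====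

-- number of sources of one topic, as both programs compute it
def pvSC (p : String × List (String × List Int)) : Int :=
  ((PySem.Dict.mk p.2).getD "sources" []).length

lemma pv_step_one (a b c : Int) (p : String × List (String × List Int)) (h : pvSC p = 1) :
    sources_per_topic_py_step (PySem.Dict.mk [("1 source", a), ("2 sources", b), ("3+ sources", c)]) p
    = PySem.Dict.mk [("1 source", a + 1), ("2 sources", b), ("3+ sources", c)] := by
  simp only [pvSC] at h
  simp only [sources_per_topic_py_step]
  rw [if_pos h]; rfl

lemma pv_step_two (a b c : Int) (p : String × List (String × List Int))
    (h1 : ¬ pvSC p = 1) (h2 : pvSC p = 2) :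
    sources_per_topic_py_step (PySem.Dict.mk [("1 source", a), ("2 sources", b), ("3+ sources", c)]) p
    = PySem.Dict.mk [("1 source", a), ("2 sources", b + 1), ("3+ sources", c)] := by
  simp only [pvSC] at h1 h2
  simp only [sources_per_topic_py_step]
  rw [if_neg h1, if_pos h2]; rfl

lemma pv_step_other (a b c : Int) (p : String × List (String × List Int))
    (h1 : ¬ pvSC p = 1) (h2 : ¬ pvSC p = 2) :
    sources_per_topic_py_step (PySem.Dict.mk [("1 source", a), ("2 sources", b), ("3+ sources", c)]) p
    = PySem.Dict.mk [("1 source", a), ("2 sources", b), ("3+ sources", c + 1)] := by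
  simp only [pvSC] at h1 h2
  simp only [sources_per_topic_py_step]
  rw [if_neg h1, if_neg h2]; rfl

-- A's loop from an arbitrary 3-counter state, characterised by B's counts
lemma pv_fold_char (ts : List (String × List (String × List Int))) :
    ∀ (a b c : Int),
    (ts.foldl sources_per_topic_py_step
      (PySem.Dict.mk [("1 source", a), ("2 sources", b), ("3+ sources", c)])).items
    = [("1 source", a + ((ts.map pvSC).countP (· == 1) : Int)),
       ("2 sources", b + ((ts.map pvSC).countP (· == 2) : Int)),
       ("3+ sources", c + ((ts.length : Int) - ((ts.map pvSC).countP (· == 1) : Int)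
                            - ((ts.map pvSC).countP (· == 2) : Int)))] := by
  induction ts with
  | nil => intro a b c; simp
  | cons p ts ih =>
    intro a b c
    simp only [List.foldl_cons]
    by_cases h1 : pvSC p = 1
    · rw [pv_step_one a b c p h1, ih]
      simp only [List.map_cons, List.countP_cons, List.length_cons, h1,
        List.cons.injEq, Prod.mk.injEq]
      norm_num
      omega
    · by_cases h2 : pvSC p = 2
      · rw [pv_step_two a b c p h1 h2, ih]
        simp only [List.map_cons, List.countP_cons, List.length_cons, h2,
          List.cons.injEq, Prod.mk.injEq]
        norm_num
        omega
      · rw [pv_step_other a b c p h1 h2, ih]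
        simp only [List.map_cons, List.countP_cons, List.length_cons,
          List.cons.injEq, Prod.mk.injEq]
        have e1 : (pvSC p == 1) = false := by simp [h1]
        have e2 : (pvSC p == 2) = false := by simp [h2]
        simp only [e1, e2]
        norm_num
        omega

-- ===== VERDICT (by name: the statement is the Claim_ definition above) =====
theorem sources_per_topic_py_spec : Claim_equal_sources_per_topic_py := by
  intro topics _
  unfold Spec_sources_per_topic_py sources_per_topic_py sources_per_topic_py_alt
  rw [pv_fold_char topics 0 0 0]
  simp only [List.length_map, List.cons.injEq, Prod.mk.injEq]
  norm_num
  exact ⟨rfl, rfl, rfl⟩
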